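-- pv_equiv track=rewrite | github.com/pabbathikarthikeya/DSA | longestxorsubarray.py | longestxorsub
-- ===== SOURCE A (Python) =====
-- def longestxorsub(arr):
--     prefixsum=0
--     xorsum=0
--     indexmap={0:-1}
--     maxlen=0
--     for i in range(len(arr)):
--         prefixsum+=arr[i]
--         xorsum^=arr[i]
--         if prefixsum==xorsum:
--             maxlen=max(maxlen,i+1)
--         if xorsum in indexmap:
--             sublen=i-indexmap[xorsum]
--             maxlen=max(maxlen,sublen)
--         else:
--             indexmap[xorsum]=i
--     return maxlen
-- ===== SOURCE B (Python) =====
-- def longestxorsub(arr):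
--     n = len(arr)
--     best = 0
--     prefixsum = 0
--     xorsum = 0
--     for i in range(n):
--         prefixsum += arr[i]
--         xorsum ^= arr[i]
--         if prefixsum == xorsum:
--             best = max(best, i + 1)
--     for l in range(n):
--         x = 0
--         for r in range(l, n):
--             x ^= arr[r]
--             if x == 0:
--                 best = max(best, r - l + 1)
--     return best
-- ===== Notes on version B (the rewrite author's own statement) =====
-- stated objective: alternative
-- what changed: Replaces A's single pass with a first-occurrence hashmap of prefix xors by a prefix scan for the sum==xor part plus a direct nested scan that re-accumulates the xor of every subarray to find the longest zero-xor subarray; no dictionary is kept.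
import Mathlib
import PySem

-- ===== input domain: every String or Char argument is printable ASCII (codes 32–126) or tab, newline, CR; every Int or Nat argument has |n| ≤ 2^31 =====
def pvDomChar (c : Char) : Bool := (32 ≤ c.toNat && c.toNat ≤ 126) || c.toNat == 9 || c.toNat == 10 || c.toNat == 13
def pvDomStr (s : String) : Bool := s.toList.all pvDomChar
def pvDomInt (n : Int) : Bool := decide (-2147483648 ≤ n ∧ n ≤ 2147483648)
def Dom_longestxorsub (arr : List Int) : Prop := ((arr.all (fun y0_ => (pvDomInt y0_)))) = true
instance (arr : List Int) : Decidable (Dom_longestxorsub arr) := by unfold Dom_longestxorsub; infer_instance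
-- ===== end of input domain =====

-- B replaces A's one-pass first-occurrence hashmap of prefix xors by a prefix scan (sum==xor part)
-- plus a direct nested scan over all subarray starts for the zero-xor part (objective: alternative).

set_option maxHeartbeats 1000000

-- ===== PORT A =====
def longestxorsubAux : List Int → Int → Int → PySem.Dict Int Int → Int → Int → Int
  | [], _, _, _, maxlen, _ => maxlen
  | v :: rest, prefixsum, xorsum, indexmap, maxlen, i =>
    let prefixsum' := prefixsum + v
    let xorsum' := PySem.Int.bxor xorsum v
    let maxlen' := if prefixsum' == xorsum' then max maxlen (i + 1) else maxlen
    match indexmap.get? xorsum' with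
    | some j => longestxorsubAux rest prefixsum' xorsum' indexmap (max maxlen' (i - j)) (i + 1)
    | none => longestxorsubAux rest prefixsum' xorsum' (indexmap.insert xorsum' i) maxlen' (i + 1)

def longestxorsub (arr : List Int) : Int :=
  longestxorsubAux arr 0 0 (PySem.Dict.ofList [(0, -1)]) 0 0

-- ===== PORT B =====
def altSumLoop : List Int → Int → Int → Int → Int → Int
  | [], _, _, best, _ => best
  | v :: rest, prefixsum, xorsum, best, i =>
    let prefixsum' := prefixsum + v
    let xorsum' := PySem.Int.bxor xorsum v
    let best' := if prefixsum' == xorsum' then max best (i + 1) else best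
    altSumLoop rest prefixsum' xorsum' best' (i + 1)

def altInner : List Int → Int → Int → Int → Int → Int
  | [], _, best, _, _ => best
  | v :: rest, x, best, r, l =>
    let x' := PySem.Int.bxor x v
    let best' := if x' == 0 then max best (r - l + 1) else best
    altInner rest x' best' (r + 1) l

def altOuter : List Int → Int → Int → Int
  | [], best, _ => best
  | v :: rest, best, l => altOuter rest (altInner (v :: rest) 0 best l l) (l + 1)

def longestxorsub_alt (arr : List Int) : Int :=
  altOuter arr (altSumLoop arr 0 0 0 0) 0

-- ===== PRECONDITION & SPEC =====
def Spec_longestxorsub (arr : List Int) (out : Int) : Prop := out = longestxorsub_alt arr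
instance (arr : List Int) (out : Int) : Decidable (Spec_longestxorsub arr out) := by unfold Spec_longestxorsub; infer_instance

-- ===== CLAIM (what is proved, stated in full; the proofs are below) =====
def Claim_equal_longestxorsub : Prop := ∀ (arr : List Int), Dom_longestxorsub arr → Spec_longestxorsub arr (longestxorsub arr)

-- ===== LEMMAS AND PROOFS =====

-- prefix xor / prefix sum of the first k elements
def pxor (arr : List Int) (k : Nat) : Int := (arr.take k).foldl PySem.Int.bxor 0
def psum (arr : List Int) (k : Nat) : Int := (arr.take k).foldl (· + ·) 0

-- first index j with pxor arr j = pxor arr k  (always exists: j = k itself)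
def fj (arr : List Int) (k : Nat) : Nat := Nat.find (⟨k, rfl⟩ : ∃ j, pxor arr j = pxor arr k)

def SL (arr : List Int) (k : Nat) : Int := if psum arr k = pxor arr k then (k : Int) else 0
def XC (arr : List Int) (k : Nat) : Int := (k : Int) - (fj arr k : Int)
def XI (arr : List Int) (l k : Nat) : Int := if pxor arr k = pxor arr l then (k : Int) - (l : Int) else 0
def G (arr : List Int) (k : Nat) : Int := max (SL arr k) (XC arr k)

-- candidate lists
def specListG (arr : List Int) : Nat → Nat → List Int
  | _, 0 => []
  | i, n + 1 => G arr (i + 1) :: specListG arr (i + 1) n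
def specListS (arr : List Int) : Nat → Nat → List Int
  | _, 0 => []
  | i, n + 1 => SL arr (i + 1) :: specListS arr (i + 1) n
def specListI (arr : List Int) (l : Nat) : Nat → Nat → List Int
  | _, 0 => []
  | r, n + 1 => XI arr l (r + 1) :: specListI arr l (r + 1) n
def specListO (arr : List Int) : Nat → Nat → List Int
  | _, 0 => []
  | l, n + 1 => specListI arr l l (n + 1) ++ specListO arr (l + 1) n

def firstOcc (arr : List Int) (i : Nat) (v : Int) : Option Int :=
  ((List.range (i + 1)).find? (fun j => pxor arr j == v)).map (fun (j : Nat) => (j : Int) - 1)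

-- xor algebra for PySem.Int.bxor (two's-complement representation ⟨sign, magnitude⟩)
theorem int_repr (a : Int) : ∃ (s : Bool) (n : Nat), a = cond s (-(n : Int) - 1) (n : Int) := by
  cases a with
  | ofNat n => exact ⟨false, n, rfl⟩
  | negSucc n =>
    refine ⟨true, n, ?_⟩
    show Int.negSucc n = -(n : Int) - 1
    rw [Int.negSucc_eq]; ring

theorem bxor_repr (s1 s2 : Bool) (n1 n2 : Nat) :
    PySem.Int.bxor (cond s1 (-(n1 : Int) - 1) (n1 : Int)) (cond s2 (-(n2 : Int) - 1) (n2 : Int))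
      = cond (s1.xor s2) (-(((n1 ^^^ n2 : Nat)) : Int) - 1) ((n1 ^^^ n2 : Nat) : Int) := by
  cases s1 <;> cases s2
  · simp [PySem.Int.bxor_natCast n1 n2]
  · show PySem.Int.bxor (n1 : Int) (-(n2 : Int) - 1) = -(((n1 ^^^ n2 : Nat)) : Int) - 1
    unfold PySem.Int.bxor
    rw [if_pos (Int.natCast_nonneg n1), if_neg (by omega)]
    have h2 : (-(-(n2 : Int) - 1) - 1) = (n2 : Int) := by ring
    rw [h2]
    simp
  · show PySem.Int.bxor (-(n1 : Int) - 1) (n2 : Int) = -(((n1 ^^^ n2 : Nat)) : Int) - 1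
    unfold PySem.Int.bxor
    rw [if_neg (by omega), if_pos (Int.natCast_nonneg n2)]
    have h1 : (-(-(n1 : Int) - 1) - 1) = (n1 : Int) := by ring
    rw [h1]
    simp
  · show PySem.Int.bxor (-(n1 : Int) - 1) (-(n2 : Int) - 1) = ((n1 ^^^ n2 : Nat) : Int)
    unfold PySem.Int.bxor
    rw [if_neg (by omega), if_neg (by omega)]
    have h1 : (-(-(n1 : Int) - 1) - 1) = (n1 : Int) := by ring
    have h2 : (-(-(n2 : Int) - 1) - 1) = (n2 : Int) := by ring
    rw [h1, h2]
    simp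

theorem bxor_assoc' (a b c : Int) :
    PySem.Int.bxor (PySem.Int.bxor a b) c = PySem.Int.bxor a (PySem.Int.bxor b c) := by
  obtain ⟨s1, n1, rfl⟩ := int_repr a
  obtain ⟨s2, n2, rfl⟩ := int_repr b
  obtain ⟨s3, n3, rfl⟩ := int_repr c
  rw [bxor_repr, bxor_repr, bxor_repr, bxor_repr, Bool.xor_assoc, Nat.xor_assoc]

theorem bxor_cancel' (a b : Int) : PySem.Int.bxor a (PySem.Int.bxor a b) = b := by
  rw [← bxor_assoc', PySem.Int.bxor_self, PySem.Int.bxor_comm]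
  exact PySem.Int.bxor_zero b

theorem bxor_eq_zero_iff' (a b : Int) : PySem.Int.bxor a b = 0 ↔ a = b := by
  constructor
  · intro h
    have hc := bxor_cancel' a b
    rw [h, PySem.Int.bxor_zero] at hc
    exact hc
  · intro h
    rw [h]
    exact PySem.Int.bxor_self b

-- foldl max lemmas
theorem fmax_base (L : List Int) : ∀ m : Int, m ≤ L.foldl max m := by
  induction L with
  | nil => intro m; simp
  | cons a L ih => intro m; exact le_trans (le_max_left m a) (ih _)

theorem fmax_mem_le (L : List Int) : ∀ (m x : Int), x ∈ L → x ≤ L.foldl max m := by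
  induction L with
  | nil => intro m x h; simp at h
  | cons a L ih =>
    intro m x h
    rcases List.mem_cons.mp h with h | h
    · subst h; exact le_trans (le_max_right m x) (fmax_base L _)
    · exact ih _ _ h

theorem fmax_le (L : List Int) : ∀ (m c : Int), m ≤ c → (∀ x ∈ L, x ≤ c) → L.foldl max m ≤ c := by
  induction L with
  | nil => intro m c hm _; simpa using hm
  | cons a L ih =>
    intro m c hm hall
    exact ih _ _ (max_le hm (hall a (by simp))) (fun x hx => hall x (by simp [hx]))

-- prefix step lemmas
theorem take_len (pre : List Int) (v : Int) (rest : List Int) :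
    (pre ++ v :: rest).take pre.length = pre := by
  induction pre with
  | nil => simp
  | cons a pre ih => simp [ih]

theorem take_len_succ (pre : List Int) (v : Int) (rest : List Int) :
    (pre ++ v :: rest).take (pre.length + 1) = pre ++ [v] := by
  induction pre with
  | nil => simp
  | cons a pre ih => simpa using ih

theorem pxor_step (pre : List Int) (v : Int) (rest : List Int) :
    pxor (pre ++ v :: rest) (pre.length + 1) = PySem.Int.bxor (pxor (pre ++ v :: rest) pre.length) v := by
  unfold pxor
  rw [take_len, take_len_succ, List.foldl_append]
  rfl

theorem psum_step (pre : List Int) (v : Int) (rest : List Int) :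
    psum (pre ++ v :: rest) (pre.length + 1) = psum (pre ++ v :: rest) pre.length + v := by
  unfold psum
  rw [take_len, take_len_succ, List.foldl_append]
  rfl

-- find? on an append / on range
theorem find?_app (p : Nat → Bool) : ∀ (l₁ l₂ : List Nat),
    (l₁ ++ l₂).find? p = (l₁.find? p).or (l₂.find? p) := by
  intro l₁ l₂
  induction l₁ with
  | nil => rfl
  | cons a l ih =>
    cases h : p a with
    | true =>
      rw [List.cons_append, List.find?_cons_of_pos h, List.find?_cons_of_pos h]
      rfl
    | false =>
      rw [List.cons_append, List.find?_cons_of_neg (by simp [h]),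
        List.find?_cons_of_neg (by simp [h]), ih]

theorem find?_range_min (p : Nat → Bool) :
    ∀ m j, (List.range m).find? p = some j → p j = true ∧ ∀ j' < j, p j' = false := by
  intro m
  induction m with
  | zero => intro j h; simp at h
  | succ m ih =>
    intro j h
    rw [List.range_succ, find?_app] at h
    cases hfind : (List.range m).find? p with
    | some j0 =>
      rw [hfind] at h
      simp only [Option.some_or, Option.some.injEq] at h
      subst h
      exact ih j0 hfind
    | none =>
      rw [hfind] at h
      simp only [Option.none_or] at h
      cases hpm : p m with
      | false => rw [List.find?_cons_of_neg (by simp [hpm])] at h; simp at h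
      | true =>
        rw [List.find?_cons_of_pos hpm] at h
        simp only [Option.some.injEq] at h
        subst h
        refine ⟨hpm, ?_⟩
        intro j' hj'
        have := List.find?_eq_none.mp hfind j' (List.mem_range.mpr hj')
        simpa using this

theorem fj_le (arr : List Int) (k : Nat) : fj arr k ≤ k :=
  Nat.find_min' _ rfl

theorem pxor_fj (arr : List Int) (k : Nat) : pxor arr (fj arr k) = pxor arr k :=
  Nat.find_spec (⟨k, rfl⟩ : ∃ j, pxor arr j = pxor arr k)

theorem fj_le_of_eq (arr : List Int) (l k : Nat) (h : pxor arr l = pxor arr k) : fj arr k ≤ l :=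
  Nat.find_min' _ h

theorem fj_of_find (arr : List Int) (m k j : Nat)
    (h : (List.range m).find? (fun j => pxor arr j == pxor arr k) = some j) :
    fj arr k = j := by
  obtain ⟨hpj, hmin⟩ := find?_range_min _ m j h
  have hj : pxor arr j = pxor arr k := by simpa using hpj
  apply le_antisymm (Nat.find_min' _ hj)
  by_contra h'
  have h'' := Nat.lt_of_not_le h'
  exact absurd (pxor_fj arr k) (by simpa using hmin _ h'')

theorem SL_nonneg (arr : List Int) (k : Nat) : 0 ≤ SL arr k := by
  unfold SL; split <;> simp

theorem XC_nonneg (arr : List Int) (k : Nat) : 0 ≤ XC arr k := by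
  unfold XC
  have := fj_le arr k
  omega

-- firstOcc transitions
theorem firstOcc_succ_of_some (arr : List Int) (i : Nat) (v : Int) (m : Int)
    (h : firstOcc arr i v = some m) : firstOcc arr (i + 1) v = some m := by
  unfold firstOcc at h ⊢
  rw [List.range_succ, find?_app]
  obtain ⟨j, hj, hm2⟩ := Option.map_eq_some_iff.mp h
  rw [hj, Option.some_or, Option.map_some, hm2]

theorem firstOcc_succ_of_none (arr : List Int) (i : Nat) (v : Int)
    (h : firstOcc arr i v = none) :
    firstOcc arr (i + 1) v = if pxor arr (i + 1) = v then some ((i : Int)) else none := by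
  unfold firstOcc at h ⊢
  rw [List.range_succ, find?_app]
  have hfind : (List.range (i + 1)).find? (fun j => pxor arr j == v) = none := by
    cases hf : (List.range (i + 1)).find? (fun j => pxor arr j == v) with
    | none => rfl
    | some j => rw [hf] at h; simp at h
  rw [hfind]
  by_cases hv : pxor arr (i + 1) = v
  · rw [if_pos hv]
    rw [List.find?_cons_of_pos (by simp [hv])]
    simp only [Option.none_or, Option.map_some]
    congr 1
    push_cast
    ring
  · rw [if_neg hv]
    rw [List.find?_cons_of_neg (by simp [hv])]
    rfl

theorem fj_eq_self_of_none (arr : List Int) (i : Nat)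
    (h : firstOcc arr i (pxor arr (i + 1)) = none) : fj arr (i + 1) = i + 1 := by
  unfold firstOcc at h
  have hfind : (List.range (i + 1)).find? (fun j => pxor arr j == pxor arr (i + 1)) = none := by
    cases hf : (List.range (i + 1)).find? (fun j => pxor arr j == pxor arr (i + 1)) with
    | none => rfl
    | some j => rw [hf] at h; simp at h
  have hle := fj_le arr (i + 1)
  rcases Nat.lt_or_ge (fj arr (i + 1)) (i + 1) with hlt | hge
  · exfalso
    have := List.find?_eq_none.mp hfind _ (List.mem_range.mpr hlt)
    simp [pxor_fj arr (i + 1)] at this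
  · omega

theorem fj_of_some (arr : List Int) (i : Nat) (m : Int)
    (h : firstOcc arr i (pxor arr (i + 1)) = some m) :
    fj arr (i + 1) ≤ i ∧ m = (fj arr (i + 1) : Int) - 1 := by
  unfold firstOcc at h
  obtain ⟨j, hj, rfl⟩ := Option.map_eq_some_iff.mp h
  have hfj := fj_of_find arr (i + 1) (i + 1) j hj
  have hmem := List.mem_range.mp (List.mem_of_find?_eq_some hj)
  constructor
  · omega
  · rw [hfj]

-- A's loop computes foldl max over the G-candidates
theorem A_loop (arr : List Int) : ∀ (rest pre : List Int) (d : PySem.Dict Int Int) (m : Int),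
    arr = pre ++ rest → 0 ≤ m →
    (∀ v, d.get? v = firstOcc arr pre.length v) →
    longestxorsubAux rest (psum arr pre.length) (pxor arr pre.length) d m ((pre.length : Nat) : Int)
      = List.foldl max m (specListG arr pre.length rest.length) := by
  intro rest
  induction rest with
  | nil => intro pre d m _ _ _; simp [longestxorsubAux, specListG]
  | cons v rest ih =>
    intro pre d m harr hm hd
    have hps : psum arr pre.length + v = psum arr (pre.length + 1) := by
      rw [harr]; exact (psum_step pre v rest).symm
    have hpx : PySem.Int.bxor (pxor arr pre.length) v = pxor arr (pre.length + 1) := by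
      rw [harr]; exact (pxor_step pre v rest).symm
    have harr' : arr = (pre ++ [v]) ++ rest := by rw [harr]; simp
    have hlen' : (pre ++ [v]).length = pre.length + 1 := by simp
    simp only [longestxorsubAux, hps, hpx]
    have hcast : ((pre.length : Nat) : Int) + 1 = (((pre.length + 1 : Nat)) : Int) := by push_cast; ring
    -- the new maxlen after the sum test
    have hSLval : (if (psum arr (pre.length + 1) == pxor arr (pre.length + 1)) = true
        then max m (((pre.length : Nat) : Int) + 1) else m) = max m (SL arr (pre.length + 1)) := by
      simp only [beq_iff_eq]
      by_cases hc : psum arr (pre.length + 1) = pxor arr (pre.length + 1)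
      · rw [if_pos hc]; unfold SL; rw [if_pos hc]; omega
      · rw [if_neg hc]; unfold SL; rw [if_neg hc]; omega
    split
    next j hlook =>
      have hfo : firstOcc arr pre.length (pxor arr (pre.length + 1)) = some j := by
        rw [← hd]; exact hlook
      obtain ⟨hfle, hjval⟩ := fj_of_some arr pre.length j hfo
      have hmax2 : max (if (psum arr (pre.length + 1) == pxor arr (pre.length + 1)) = true
          then max m (((pre.length : Nat) : Int) + 1) else m) (((pre.length : Nat) : Int) - j)
          = max m (G arr (pre.length + 1)) := by
        rw [hSLval]
        have hxc : ((pre.length : Nat) : Int) - j = XC arr (pre.length + 1) := by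
          rw [hjval]; unfold XC; push_cast; ring
        rw [hxc]
        unfold G
        have := SL_nonneg arr (pre.length + 1)
        have := XC_nonneg arr (pre.length + 1)
        omega
      rw [hmax2]
      have hd' : ∀ w, d.get? w = firstOcc arr (pre.length + 1) w := by
        intro w
        cases hw : firstOcc arr pre.length w with
        | some mw => rw [hd w, hw, firstOcc_succ_of_some arr pre.length w mw hw]
        | none =>
          rw [hd w, hw, firstOcc_succ_of_none arr pre.length w hw]
          rw [if_neg]
          intro heq
          rw [heq] at hlook
          rw [hd w, hw] at hlook
          simp at hlook
      have := ih (pre ++ [v]) d (max m (G arr (pre.length + 1))) harr'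
        (le_trans hm (le_max_left _ _)) (by rw [hlen']; exact hd')
      rw [hlen'] at this
      rw [hcast, this]
      simp [specListG]
    next hlook =>
      have hfo : firstOcc arr pre.length (pxor arr (pre.length + 1)) = none := by
        rw [← hd]; exact hlook
      have hfj : fj arr (pre.length + 1) = pre.length + 1 := fj_eq_self_of_none arr pre.length hfo
      have hmax2 : (if (psum arr (pre.length + 1) == pxor arr (pre.length + 1)) = true
          then max m (((pre.length : Nat) : Int) + 1) else m) = max m (G arr (pre.length + 1)) := by
        rw [hSLval]
        unfold G
        have hxc : XC arr (pre.length + 1) = 0 := by unfold XC; rw [hfj]; omega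
        rw [hxc]
        have := SL_nonneg arr (pre.length + 1)
        omega
      rw [hmax2]
      have hd' : ∀ w, (d.insert (pxor arr (pre.length + 1)) ((pre.length : Nat) : Int)).get? w
          = firstOcc arr (pre.length + 1) w := by
        intro w
        rw [PySem.Dict.get?_insert]
        by_cases hw : w = pxor arr (pre.length + 1)
        · rw [if_pos hw, hw]
          rw [firstOcc_succ_of_none arr pre.length _ hfo, if_pos rfl]
        · rw [if_neg hw]
          cases hw' : firstOcc arr pre.length w with
          | some mw => rw [hd w, hw', firstOcc_succ_of_some arr pre.length w mw hw']
          | none =>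
            rw [hd w, hw', firstOcc_succ_of_none arr pre.length w hw']
            rw [if_neg]
            intro heq
            exact hw heq.symm
      have := ih (pre ++ [v]) (d.insert (pxor arr (pre.length + 1)) ((pre.length : Nat) : Int))
        (max m (G arr (pre.length + 1))) harr' (le_trans hm (le_max_left _ _))
        (by rw [hlen']; exact hd')
      rw [hlen'] at this
      rw [hcast, this]
      simp [specListG]

-- B's first loop
theorem B_sum_loop (arr : List Int) : ∀ (rest pre : List Int) (m : Int),
    arr = pre ++ rest → 0 ≤ m →
    altSumLoop rest (psum arr pre.length) (pxor arr pre.length) m ((pre.length : Nat) : Int)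
      = List.foldl max m (specListS arr pre.length rest.length) := by
  intro rest
  induction rest with
  | nil => intro pre m _ _; simp [altSumLoop, specListS]
  | cons v rest ih =>
    intro pre m harr hm
    have hps : psum arr pre.length + v = psum arr (pre.length + 1) := by
      rw [harr]; exact (psum_step pre v rest).symm
    have hpx : PySem.Int.bxor (pxor arr pre.length) v = pxor arr (pre.length + 1) := by
      rw [harr]; exact (pxor_step pre v rest).symm
    have harr' : arr = (pre ++ [v]) ++ rest := by rw [harr]; simp
    have hlen' : (pre ++ [v]).length = pre.length + 1 := by simp
    simp only [altSumLoop, hps, hpx]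
    have hcast : ((pre.length : Nat) : Int) + 1 = (((pre.length + 1 : Nat)) : Int) := by push_cast; ring
    have hSLval : (if (psum arr (pre.length + 1) == pxor arr (pre.length + 1)) = true
        then max m (((pre.length : Nat) : Int) + 1) else m) = max m (SL arr (pre.length + 1)) := by
      simp only [beq_iff_eq]
      by_cases hc : psum arr (pre.length + 1) = pxor arr (pre.length + 1)
      · rw [if_pos hc]; unfold SL; rw [if_pos hc]; omega
      · rw [if_neg hc]; unfold SL; rw [if_neg hc]; omega
    rw [hSLval]
    have := ih (pre ++ [v]) (max m (SL arr (pre.length + 1))) harr' (le_trans hm (le_max_left _ _))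
    rw [hlen'] at this
    rw [hcast, this]
    simp [specListS]

-- B's inner loop
theorem B_inner_loop (arr : List Int) : ∀ (rest pre : List Int) (m : Int) (l : Nat),
    arr = pre ++ rest → 0 ≤ m →
    altInner rest (PySem.Int.bxor (pxor arr l) (pxor arr pre.length)) m ((pre.length : Nat) : Int) ((l : Nat) : Int)
      = List.foldl max m (specListI arr l pre.length rest.length) := by
  intro rest
  induction rest with
  | nil => intro pre m l _ _; simp [altInner, specListI]
  | cons v rest ih =>
    intro pre m l harr hm
    have hpx : PySem.Int.bxor (pxor arr pre.length) v = pxor arr (pre.length + 1) := by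
      rw [harr]; exact (pxor_step pre v rest).symm
    have harr' : arr = (pre ++ [v]) ++ rest := by rw [harr]; simp
    have hlen' : (pre ++ [v]).length = pre.length + 1 := by simp
    simp only [altInner]
    have hx : PySem.Int.bxor (PySem.Int.bxor (pxor arr l) (pxor arr pre.length)) v
        = PySem.Int.bxor (pxor arr l) (pxor arr (pre.length + 1)) := by
      rw [bxor_assoc', hpx]
    rw [hx]
    have hcast : ((pre.length : Nat) : Int) + 1 = (((pre.length + 1 : Nat)) : Int) := by push_cast; ring
    have hXIval : (if (PySem.Int.bxor (pxor arr l) (pxor arr (pre.length + 1)) == 0) = true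
        then max m (((pre.length : Nat) : Int) - ((l : Nat) : Int) + 1) else m)
        = max m (XI arr l (pre.length + 1)) := by
      have hiff : (PySem.Int.bxor (pxor arr l) (pxor arr (pre.length + 1)) == 0) = true
          ↔ pxor arr (pre.length + 1) = pxor arr l := by
        rw [beq_iff_eq, bxor_eq_zero_iff']
        exact ⟨fun h => h.symm, fun h => h.symm⟩
      by_cases hc : pxor arr (pre.length + 1) = pxor arr l
      · rw [if_pos (hiff.mpr hc)]
        unfold XI
        rw [if_pos hc]
        omega
      · rw [if_neg (fun h => hc (hiff.mp h))]
        unfold XI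
        rw [if_neg hc]
        omega
    rw [hXIval]
    have := ih (pre ++ [v]) (max m (XI arr l (pre.length + 1))) l harr' (le_trans hm (le_max_left _ _))
    rw [hlen'] at this
    rw [hcast, this]
    simp [specListI]

-- B's outer loop
theorem B_outer_loop (arr : List Int) : ∀ (rest pre : List Int) (m : Int),
    arr = pre ++ rest → 0 ≤ m →
    altOuter rest m ((pre.length : Nat) : Int)
      = List.foldl max m (specListO arr pre.length rest.length) := by
  intro rest
  induction rest with
  | nil => intro pre m _ _; simp [altOuter, specListO]
  | cons v rest ih =>
    intro pre m harr hm
    simp only [altOuter]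
    have hinner : altInner (v :: rest) 0 m ((pre.length : Nat) : Int) ((pre.length : Nat) : Int)
        = List.foldl max m (specListI arr pre.length pre.length (rest.length + 1)) := by
      have h0 : PySem.Int.bxor (pxor arr pre.length) (pxor arr pre.length) = 0 :=
        PySem.Int.bxor_self _
      have := B_inner_loop arr (v :: rest) pre m pre.length harr hm
      rw [h0] at this
      simpa using this
    rw [hinner]
    have harr' : arr = (pre ++ [v]) ++ rest := by rw [harr]; simp
    have hlen' : (pre ++ [v]).length = pre.length + 1 := by simp
    have hm' : 0 ≤ List.foldl max m (specListI arr pre.length pre.length (rest.length + 1)) :=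
      le_trans hm (fmax_base _ m)
    have hcast : ((pre.length : Nat) : Int) + 1 = (((pre.length + 1 : Nat)) : Int) := by push_cast; ring
    have := ih (pre ++ [v]) (List.foldl max m (specListI arr pre.length pre.length (rest.length + 1))) harr' hm'
    rw [hlen'] at this
    rw [hcast, this]
    simp only [specListO, List.length_cons]
    rw [List.foldl_append]

-- membership characterizations
theorem mem_specListG (arr : List Int) : ∀ (n i : Nat) (x : Int),
    x ∈ specListG arr i n ↔ ∃ t, t < n ∧ x = G arr (i + t + 1) := by
  intro n
  induction n with
  | zero => intro i x; simp [specListG]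
  | succ n ih =>
    intro i x
    constructor
    · intro hx
      rcases List.mem_cons.mp hx with rfl | hx
      · exact ⟨0, Nat.succ_pos n, rfl⟩
      · obtain ⟨t, ht, rfl⟩ := (ih (i + 1) x).mp hx
        exact ⟨t + 1, by omega, by rw [show i + (t + 1) + 1 = i + 1 + t + 1 by omega]⟩
    · rintro ⟨t, ht, rfl⟩
      cases t with
      | zero => exact List.mem_cons_self
      | succ t =>
        exact List.mem_cons_of_mem _
          ((ih (i + 1) _).mpr ⟨t, by omega, by rw [show i + 1 + t + 1 = i + (t + 1) + 1 by omega]⟩)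

theorem mem_specListS (arr : List Int) : ∀ (n i : Nat) (x : Int),
    x ∈ specListS arr i n ↔ ∃ t, t < n ∧ x = SL arr (i + t + 1) := by
  intro n
  induction n with
  | zero => intro i x; simp [specListS]
  | succ n ih =>
    intro i x
    constructor
    · intro hx
      rcases List.mem_cons.mp hx with rfl | hx
      · exact ⟨0, Nat.succ_pos n, rfl⟩
      · obtain ⟨t, ht, rfl⟩ := (ih (i + 1) x).mp hx
        exact ⟨t + 1, by omega, by rw [show i + (t + 1) + 1 = i + 1 + t + 1 by omega]⟩
    · rintro ⟨t, ht, rfl⟩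
      cases t with
      | zero => exact List.mem_cons_self
      | succ t =>
        exact List.mem_cons_of_mem _
          ((ih (i + 1) _).mpr ⟨t, by omega, by rw [show i + 1 + t + 1 = i + (t + 1) + 1 by omega]⟩)

theorem mem_specListI (arr : List Int) (l : Nat) : ∀ (n r : Nat) (x : Int),
    x ∈ specListI arr l r n ↔ ∃ t, t < n ∧ x = XI arr l (r + t + 1) := by
  intro n
  induction n with
  | zero => intro r x; simp [specListI]
  | succ n ih =>
    intro r x
    constructor
    · intro hx
      rcases List.mem_cons.mp hx with rfl | hx
      · exact ⟨0, Nat.succ_pos n, rfl⟩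
      · obtain ⟨t, ht, rfl⟩ := (ih (r + 1) x).mp hx
        exact ⟨t + 1, by omega, by rw [show r + (t + 1) + 1 = r + 1 + t + 1 by omega]⟩
    · rintro ⟨t, ht, rfl⟩
      cases t with
      | zero => exact List.mem_cons_self
      | succ t =>
        exact List.mem_cons_of_mem _
          ((ih (r + 1) _).mpr ⟨t, by omega, by rw [show r + 1 + t + 1 = r + (t + 1) + 1 by omega]⟩)

theorem mem_specListO (arr : List Int) : ∀ (n l : Nat) (x : Int), x ∈ specListO arr l n →
    ∃ l' k, l ≤ l' ∧ l' < k ∧ k ≤ l + n ∧ x = XI arr l' k := by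
  intro n
  induction n with
  | zero => intro l x h; simp [specListO] at h
  | succ n ih =>
    intro l x h
    rcases List.mem_append.mp h with h | h
    · obtain ⟨t, ht, rfl⟩ := (mem_specListI arr l (n + 1) l _).mp h
      exact ⟨l, l + t + 1, le_rfl, by omega, by omega, rfl⟩
    · obtain ⟨l', k, h1, h2, h3, rfl⟩ := ih (l + 1) x h
      exact ⟨l', k, by omega, h2, by omega, rfl⟩

theorem specListO_mem_intro (arr : List Int) : ∀ (n l₀ l k : Nat), l₀ ≤ l → l < k → k ≤ l₀ + n →
    XI arr l k ∈ specListO arr l₀ n := by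
  intro n
  induction n with
  | zero => intro l₀ l k h1 h2 h3; omega
  | succ n ih =>
    intro l₀ l k h1 h2 h3
    by_cases heq : l₀ = l
    · subst heq
      apply List.mem_append.mpr
      left
      apply (mem_specListI arr l₀ (n + 1) l₀ _).mpr
      exact ⟨k - l₀ - 1, by omega, by rw [show l₀ + (k - l₀ - 1) + 1 = k by omega]⟩
    · apply List.mem_append.mpr
      right
      exact ih (l₀ + 1) l k (by omega) h2 (by omega)

-- initial dict of A matches firstOcc at step 0
theorem init_dict (arr : List Int) (v : Int) :
    (PySem.Dict.ofList [((0 : Int), (-1 : Int))]).get? v = firstOcc arr 0 v := by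
  have h0 : pxor arr 0 = 0 := rfl
  unfold firstOcc
  have hr : List.range 1 = [0] := rfl
  rw [hr]
  have hmk : PySem.Dict.ofList [((0 : Int), (-1 : Int))] = PySem.Dict.mk [(0, -1)] := rfl
  rw [hmk, PySem.Dict.get?_mk_cons]
  by_cases hv : (0 : Int) = v
  · rw [if_pos (by simpa using hv)]
    rw [List.find?_cons_of_pos (by simp [h0, hv])]
    simp
  · rw [if_neg (by simpa using hv)]
    rw [List.find?_cons_of_neg (by simp [h0]; exact hv)]
    rfl

-- ===== VERDICT (by name: the statement is the Claim_ definition above) =====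
theorem longestxorsub_spec : Claim_equal_longestxorsub := by
  unfold Claim_equal_longestxorsub
  intro arr _
  unfold Spec_longestxorsub
  have hA : longestxorsub arr = List.foldl max 0 (specListG arr 0 arr.length) := by
    unfold longestxorsub
    have := A_loop arr arr [] (PySem.Dict.ofList [(0, -1)]) 0 (by simp) le_rfl
      (fun v => init_dict arr v)
    simpa using this
  have hBsum : altSumLoop arr 0 0 0 0 = List.foldl max 0 (specListS arr 0 arr.length) := by
    have := B_sum_loop arr arr [] 0 (by simp) le_rfl
    simpa using this
  have hB : longestxorsub_alt arr
      = List.foldl max 0 (specListS arr 0 arr.length ++ specListO arr 0 arr.length) := by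
    unfold longestxorsub_alt
    rw [hBsum]
    have h0 : (0 : Int) ≤ List.foldl max 0 (specListS arr 0 arr.length) := fmax_base _ 0
    have := B_outer_loop arr arr [] (List.foldl max 0 (specListS arr 0 arr.length)) (by simp) h0
    rw [List.foldl_append]
    simpa using this
  rw [hA, hB]
  have hBnn : (0 : Int) ≤ List.foldl max 0 (specListS arr 0 arr.length ++ specListO arr 0 arr.length) :=
    fmax_base _ 0
  have hAnn : (0 : Int) ≤ List.foldl max 0 (specListG arr 0 arr.length) := fmax_base _ 0
  apply le_antisymm
  · apply fmax_le _ _ _ hBnn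
    intro x hx
    obtain ⟨t, ht, rfl⟩ := (mem_specListG arr arr.length 0 x).mp hx
    apply max_le
    · apply fmax_mem_le
      exact List.mem_append.mpr (Or.inl ((mem_specListS arr arr.length 0 _).mpr ⟨t, ht, rfl⟩))
    · by_cases hne : fj arr (0 + t + 1) = 0 + t + 1
      · have : XC arr (0 + t + 1) = 0 := by unfold XC; rw [hne]; omega
        rw [this]
        exact hBnn
      · have hlt : fj arr (0 + t + 1) < 0 + t + 1 := lt_of_le_of_ne (fj_le arr _) hne
        have hXIeq : XC arr (0 + t + 1) = XI arr (fj arr (0 + t + 1)) (0 + t + 1) := by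
          unfold XC XI
          rw [if_pos (pxor_fj arr (0 + t + 1)).symm]
        rw [hXIeq]
        apply fmax_mem_le
        exact List.mem_append.mpr (Or.inr
          (specListO_mem_intro arr arr.length 0 (fj arr (0 + t + 1)) (0 + t + 1)
            (Nat.zero_le _) hlt (by omega)))
  · apply fmax_le _ _ _ hAnn
    intro x hx
    rcases List.mem_append.mp hx with hx | hx
    · obtain ⟨t, ht, rfl⟩ := (mem_specListS arr arr.length 0 x).mp hx
      have h1 : SL arr (0 + t + 1) ≤ G arr (0 + t + 1) := le_max_left _ _
      exact le_trans h1 (fmax_mem_le _ 0 _ ((mem_specListG arr arr.length 0 _).mpr ⟨t, ht, rfl⟩))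
    · obtain ⟨l, k, hl, hlk, hkn, rfl⟩ := mem_specListO arr arr.length 0 x hx
      by_cases hc : pxor arr k = pxor arr l
      · have h1 : XI arr l k = (k : Int) - (l : Int) := by unfold XI; rw [if_pos hc]
        have hfj : fj arr k ≤ l := fj_le_of_eq arr l k hc.symm
        have h2 : XI arr l k ≤ XC arr k := by
          rw [h1]; unfold XC
          have : (fj arr k : Int) ≤ (l : Int) := by exact_mod_cast hfj
          omega
        have h3 : XC arr k ≤ G arr k := le_max_right _ _
        have hk1 : 1 ≤ k := by omega
        have hmem : G arr k ∈ specListG arr 0 arr.length := by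
          apply (mem_specListG arr arr.length 0 _).mpr
          exact ⟨k - 1, by omega, by rw [show 0 + (k - 1) + 1 = k by omega]⟩
        exact le_trans (le_trans h2 h3) (fmax_mem_le _ 0 _ hmem)
      · have h1 : XI arr l k = 0 := by unfold XI; rw [if_neg hc]
        rw [h1]
        exact hAnn
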